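-- pv_equiv track=rewrite | github.com/Demiko/BalashM | BalashM.py | buildvar
-- ===== SOURCE A (Python) =====
-- def buildvar(ind: list, a: list, b: list, x: list = None) -> list:
--     """
--     :type x: list
--     :param ind: list
--     :param a: list
--     :param b: list
--     :param x: list
--     :return: list
--     """
--     if x is None:
--         x = [0] * len(a[0])
--     for j in ind:
--         if x[j] == 1:
--             continue
--         b1 = []
--         ok = True
--         for i in range(len(b)):
--             _b = b[i] - a[i][j]
--             if _b < 0:
--                 ok = False
--                 break
--             b1.append(_b)
--         if ok:
--             x[j] = 1
--             b = b1
--     return x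
-- ===== SOURCE B (Python) =====
-- def buildvar(ind: list, a: list, b: list, x: list = None) -> list:
--     if x is None:
--         x = [0] * len(a[0])
--     chosen = []
--     for j in ind:
--         if x[j] == 1:
--             continue
--         if all(b[i] - sum(a[i][k] for k in chosen) - a[i][j] >= 0 for i in range(len(b))):
--             x[j] = 1
--             chosen.append(j)
--     return x
-- ===== Notes on version B (the rewrite author's own statement) =====
-- stated objective: alternative
-- what changed: B maintains no running residual vector at all: it records the list of accepted columns and tests each candidate row-by-row against the ORIGINAL b, recomputing per-row consumption as a sum over the accepted columns inside a short-circuiting all(); A instead rebuilds a residual vector b1 with an ok-flag/early-break inner loop and replaces b on acceptance.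
-- outside the precondition, e.g. on buildvar([0], [[5], []], [3, 7], None): A returns [0], B returns [0]; on buildvar([0], [[1]], [2, 3], [1]): A returns [1], B returns [1]
import Mathlib
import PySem

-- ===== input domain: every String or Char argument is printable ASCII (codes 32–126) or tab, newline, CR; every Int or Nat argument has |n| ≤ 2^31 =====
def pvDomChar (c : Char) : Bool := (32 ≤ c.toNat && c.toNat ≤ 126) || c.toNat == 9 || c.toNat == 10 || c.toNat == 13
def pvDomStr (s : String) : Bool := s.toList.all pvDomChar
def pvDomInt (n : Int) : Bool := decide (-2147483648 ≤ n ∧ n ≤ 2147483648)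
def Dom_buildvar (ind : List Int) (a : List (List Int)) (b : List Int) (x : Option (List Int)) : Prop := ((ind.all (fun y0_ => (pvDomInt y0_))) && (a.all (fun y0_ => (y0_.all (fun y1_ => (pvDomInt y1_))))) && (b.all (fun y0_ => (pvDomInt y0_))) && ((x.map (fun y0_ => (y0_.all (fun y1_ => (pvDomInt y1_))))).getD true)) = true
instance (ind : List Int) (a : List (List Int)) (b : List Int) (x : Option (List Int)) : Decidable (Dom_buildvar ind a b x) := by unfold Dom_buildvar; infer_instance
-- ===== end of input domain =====

-- B keeps no running residual vector: it records the accepted columns and re-tests each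
-- candidate against the ORIGINAL b by recomputing per-row consumption as a sum over the
-- accepted columns, while A rebuilds a residual vector b1 with an ok-flag/early-break loop.
-- Both Pythons mutate x in place identically; the equivalence proved is about the returned list.

-- ===== PORT A =====
-- the initial x: '[0] * len(a[0])' when x is None (Pre_ guarantees a ≠ [] in that case)
def pvInitX (a : List (List Int)) (x : Option (List Int)) : List Int :=
  match x with
  | none => List.replicate (a.headD []).length 0
  | some xs => xs

-- port of A: outer foldl over ind; inner loop 'for i in range(len(b))' with the ok flag,
-- the break modelled by the flag short-circuiting the rest of the fold
def buildvar (ind : List Int) (a : List (List Int)) (b : List Int) (x : Option (List Int)) : List Int :=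
  (ind.foldl (fun (s : List Int × List Int) j =>
    if PySem.List.pyGetD s.1 j 0 = 1 then s
    else
      let r := (PySem.List.pyRange 0 (s.2.length : Int) 1).foldl (fun (t : List Int × Bool) i =>
        if t.2 = false then t
        else
          let v := PySem.List.pyGetD s.2 i 0 - PySem.List.pyGetD (PySem.List.pyGetD a i []) j 0
          if v < 0 then (t.1, false) else (t.1 ++ [v], true)) ([], true)
      if r.2 then (PySem.List.pySetD s.1 j 1, r.1) else s) (pvInitX a x, b)).1

-- ===== PORT B =====
-- 'sum(a[i][k] for k in chosen)'
def pvRowSum (row : List Int) (chosen : List Int) : Int :=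
  chosen.foldl (fun acc k => acc + PySem.List.pyGetD row k 0) 0

-- port of B: state = (x, chosen); each candidate tested against the ORIGINAL b with
-- 'all(b[i] - sum(a[i][k] for k in chosen) - a[i][j] >= 0 for i in range(len(b)))'
def buildvar_alt (ind : List Int) (a : List (List Int)) (b : List Int) (x : Option (List Int)) : List Int :=
  (ind.foldl (fun (s : List Int × List Int) j =>
    if PySem.List.pyGetD s.1 j 0 = 1 then s
    else if (PySem.List.pyRange 0 (b.length : Int) 1).all (fun i =>
        0 ≤ PySem.List.pyGetD b i 0 - pvRowSum (PySem.List.pyGetD a i []) s.2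
              - PySem.List.pyGetD (PySem.List.pyGetD a i []) j 0)
    then (PySem.List.pySetD s.1 j 1, s.2 ++ [j]) else s) (pvInitX a x, [])).1

-- ===== PRECONDITION & SPEC =====
-- Pre_ is a closed-form bound on the index accesses both Pythons make (a[0] exists when x is
-- None, every j of ind in range of x and of the first len(b) rows of a, len(b) ≤ len(a)):
-- outside it some execution of A raises IndexError, and B raises at exactly the same point;
-- where A's early break or the x[j]==1 skip happens to avoid the bad access both programs
-- still return and agree (see the cites), but that set cannot be stated without simulating the run.
def Pre_buildvar (ind : List Int) (a : List (List Int)) (b : List Int) (x : Option (List Int)) : Prop :=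
  (x = none → a ≠ []) ∧
  ∀ j ∈ ind, PySem.Raise.InRange (pvInitX a x).length j ∧
    b.length ≤ a.length ∧
    ∀ row ∈ a.take b.length, PySem.Raise.InRange row.length j
instance (ind : List Int) (a : List (List Int)) (b : List Int) (x : Option (List Int)) : Decidable (Pre_buildvar ind a b x) := by unfold Pre_buildvar; infer_instance

def pvWitness_buildvar : List Int × List (List Int) × List Int × Option (List Int) :=
  ([0, 1], [[1, 2], [3, 4]], [5, 6], none)

def Spec_buildvar (ind : List Int) (a : List (List Int)) (b : List Int) (x : Option (List Int)) (out : List Int) : Prop := out = buildvar_alt ind a b x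
instance (ind : List Int) (a : List (List Int)) (b : List Int) (x : Option (List Int)) (out : List Int) : Decidable (Spec_buildvar ind a b x out) := by unfold Spec_buildvar; infer_instance

-- ===== CLAIM (what is proved, stated in full; the proofs are below) =====
def Claim_equal_buildvar : Prop := ∀ (ind : List Int) (a : List (List Int)) (b : List Int) (x : Option (List Int)), Dom_buildvar ind a b x → Pre_buildvar ind a b x → Spec_buildvar ind a b x (buildvar ind a b x)

-- ===== LEMMAS AND PROOFS =====

-- generic: two folds over the same list, with DIFFERENT state types, stay related by R
theorem foldl_rel {α σ τ : Type} (R : σ → τ → Prop) (f : σ → α → σ) (g : τ → α → τ) :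
    ∀ (l : List α) (s : σ) (t : τ), R s t →
      (∀ s t y, y ∈ l → R s t → R (f s y) (g t y)) →
      R (l.foldl f s) (l.foldl g t) := by
  intro l
  induction l with
  | nil => intro s t hst _; exact hst
  | cons y l ih =>
    intro s t hst hstep
    exact ih (f s y) (g t y) (hstep s t y List.mem_cons_self hst)
      (fun s t z hz ht => hstep s t z (List.mem_cons_of_mem _ hz) ht)

-- once the ok flag is false, the rest of A's inner loop does nothing (the break)
theorem flag_false_fix (nb : List Int) :
    ∀ l : List Int × Bool, l.2 = false →
      (nb.foldl (fun (t : List Int × Bool) v =>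
        if t.2 = false then t
        else if v < 0 then (t.1, false) else (t.1 ++ [v], true)) l) = l := by
  induction nb with
  | nil => intro l _; rfl
  | cons v nb ih => intro l hl; simp only [List.foldl_cons, if_pos hl]; exact ih l hl

-- the flag-and-append fold over the candidate list: flag = all nonneg; when the flag survives,
-- the accumulated list is acc ++ the whole candidate list
theorem inner_fold_char (nb : List Int) :
    ∀ acc : List Int,
      (nb.foldl (fun (t : List Int × Bool) v =>
        if t.2 = false then t
        else if v < 0 then (t.1, false) else (t.1 ++ [v], true)) (acc, true))
      = (if nb.all (fun v => 0 ≤ v) then (acc ++ nb, true)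
         else ((nb.takeWhile (fun v => 0 ≤ v)).foldl (fun l v => l ++ [v]) acc, false)) := by
  induction nb with
  | nil => intro acc; simp
  | cons v nb ih =>
    intro acc
    by_cases hv : v < 0
    · have hall : (v :: nb).all (fun v => 0 ≤ v) = false := by
        simp [List.all_cons, not_le.mpr hv]
      simp only [List.foldl_cons, if_neg (by simp : ¬ (true = false)), if_pos hv]
      rw [flag_false_fix nb (acc, false) rfl, hall]
      simp [not_le.mpr hv]
    · rw [not_lt] at hv
      simp only [List.foldl_cons, if_neg (by simp : ¬ (true = false)), if_neg (not_lt.mpr hv)]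
      rw [ih (acc ++ [v])]
      simp [List.all_cons, hv]

-- A's inner index loop, on a state with u.length ≤ a.length, computes exactly the candidate
-- vector nb = zipWith (-) u (column j of a) and the all-nonnegative test
theorem inner_eq (a : List (List Int)) (j : Int) (u : List Int) (h : u.length ≤ a.length) :
    ((PySem.List.pyRange 0 (u.length : Int) 1).foldl (fun (t : List Int × Bool) i =>
        if t.2 = false then t
        else
          let v := PySem.List.pyGetD u i 0 - PySem.List.pyGetD (PySem.List.pyGetD a i []) j 0
          if v < 0 then (t.1, false) else (t.1 ++ [v], true)) ([], true))
      = (if ((u.zip a).map (fun p => p.1 - PySem.List.pyGetD p.2 j 0)).all (fun v => 0 ≤ v)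
         then ((u.zip a).map (fun p => p.1 - PySem.List.pyGetD p.2 j 0), true)
         else ((((u.zip a).map (fun p => p.1 - PySem.List.pyGetD p.2 j 0)).takeWhile
                 (fun v => 0 ≤ v)).foldl (fun l v => l ++ [v]) [], false)) := by
  set nb := (u.zip a).map (fun p => p.1 - PySem.List.pyGetD p.2 j 0) with hnb
  have hlen : nb.length = u.length := by
    simp [hnb, Nat.min_eq_left h]
  have hval : ∀ i : Int, 0 ≤ i → i < (u.length : Int) →
      PySem.List.pyGetD u i 0 - PySem.List.pyGetD (PySem.List.pyGetD a i []) j 0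
        = PySem.List.pyGetD nb i 0 := by
    intro i h0 hi
    have hiu : i.toNat < u.length := by omega
    have hia : i < (a.length : Int) := by
      have := h; omega
    rw [PySem.List.pyGetD_eq_getElem u 0 h0 hi,
        PySem.List.pyGetD_eq_getElem a [] h0 hia,
        PySem.List.pyGetD_eq_getElem nb 0 h0 (by rw [hlen]; exact hi)]
    simp [hnb, List.getElem_zip]
  have hcongr : ((PySem.List.pyRange 0 (u.length : Int) 1).foldl (fun (t : List Int × Bool) i =>
        if t.2 = false then t
        else
          let v := PySem.List.pyGetD u i 0 - PySem.List.pyGetD (PySem.List.pyGetD a i []) j 0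
          if v < 0 then (t.1, false) else (t.1 ++ [v], true)) ([], true))
      = ((PySem.List.pyRange 0 (nb.length : Int) 1).foldl (fun (t : List Int × Bool) i =>
          (fun (t : List Int × Bool) v =>
            if t.2 = false then t
            else if v < 0 then (t.1, false) else (t.1 ++ [v], true)) t (PySem.List.pyGetD nb i 0)) ([], true)) := by
    rw [hlen]
    apply PySem.List.foldl_congr_mem
    intro acc i hi
    rw [PySem.List.mem_pyRange_one] at hi
    simp only [hval i hi.1 hi.2]
  rw [hcongr, PySem.List.foldl_pyRange_zero_pyGetD' nb 0
        (fun (t : List Int × Bool) v =>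
          if t.2 = false then t
          else if v < 0 then (t.1, false) else (t.1 ++ [v], true)) ([], true),
      inner_fold_char nb []]
  simp

-- appending one accepted column to pvRowSum
theorem pvRowSum_append (row : List Int) (c : List Int) (j : Int) :
    pvRowSum row (c ++ [j]) = pvRowSum row c + PySem.List.pyGetD row j 0 := by
  simp [pvRowSum, List.foldl_append]

-- the joint invariant between A's state (x, residual) and B's state (x, chosen)
def pvInv (a : List (List Int)) (b : List Int) (s t : List Int × List Int) : Prop :=
  s.1 = t.1 ∧ s.2.length = b.length ∧
  ∀ i : Int, 0 ≤ i → i < (b.length : Int) →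
    PySem.List.pyGetD s.2 i 0
      = PySem.List.pyGetD b i 0 - pvRowSum (PySem.List.pyGetD a i []) t.2

-- ===== VERDICT (by name: the statement is the Claim_ definition above) =====
theorem buildvar_spec : Claim_equal_buildvar := by
  intro ind a b x _ hpre
  unfold Spec_buildvar buildvar buildvar_alt
  have hmain : pvInv a b
      (ind.foldl (fun (s : List Int × List Int) j =>
        if PySem.List.pyGetD s.1 j 0 = 1 then s
        else
          let r := (PySem.List.pyRange 0 (s.2.length : Int) 1).foldl (fun (t : List Int × Bool) i =>
            if t.2 = false then t
            else
              let v := PySem.List.pyGetD s.2 i 0 - PySem.List.pyGetD (PySem.List.pyGetD a i []) j 0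
              if v < 0 then (t.1, false) else (t.1 ++ [v], true)) ([], true)
          if r.2 then (PySem.List.pySetD s.1 j 1, r.1) else s) (pvInitX a x, b))
      (ind.foldl (fun (s : List Int × List Int) j =>
        if PySem.List.pyGetD s.1 j 0 = 1 then s
        else if (PySem.List.pyRange 0 (b.length : Int) 1).all (fun i =>
            0 ≤ PySem.List.pyGetD b i 0 - pvRowSum (PySem.List.pyGetD a i []) s.2
                  - PySem.List.pyGetD (PySem.List.pyGetD a i []) j 0)
        then (PySem.List.pySetD s.1 j 1, s.2 ++ [j]) else s) (pvInitX a x, [])) := by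
    apply foldl_rel
    · exact ⟨rfl, rfl, fun i h0 hi => by simp [pvRowSum]⟩
    · intro s t j hj hst
      obtain ⟨hx, hlen, hres⟩ := hst
      obtain ⟨-, hba, -⟩ := hpre.2 j hj
      have hsa : s.2.length ≤ a.length := hlen ▸ hba
      -- the candidate vector and its pointwise description
      set nb := (s.2.zip a).map (fun p => p.1 - PySem.List.pyGetD p.2 j 0) with hnb
      have hnbl : nb.length = b.length := by
        simp [hnb]; omega
      have hptw : ∀ i : Int, 0 ≤ i → i < (b.length : Int) →
          PySem.List.pyGetD nb i 0
            = PySem.List.pyGetD b i 0 - pvRowSum (PySem.List.pyGetD a i []) t.2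
                - PySem.List.pyGetD (PySem.List.pyGetD a i []) j 0 := by
        intro i h0 hi
        have hiu : i.toNat < s.2.length := by omega
        have hia : i < (a.length : Int) := by omega
        rw [PySem.List.pyGetD_eq_getElem nb 0 h0 (by rw [hnbl]; exact hi)]
        have : nb[i.toNat]'(by rw [hnbl]; omega)
            = s.2[i.toNat]'hiu - PySem.List.pyGetD (a[i.toNat]'(by omega)) j 0 := by
          simp [hnb, List.getElem_zip]
        rw [this, ← PySem.List.pyGetD_eq_getElem s.2 0 h0 (by omega),
            ← PySem.List.pyGetD_eq_getElem a [] h0 hia, hres i h0 hi]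
      -- both acceptance tests coincide
      have htest : nb.all (fun v => 0 ≤ v)
          = (PySem.List.pyRange 0 (b.length : Int) 1).all (fun i =>
              0 ≤ PySem.List.pyGetD b i 0 - pvRowSum (PySem.List.pyGetD a i []) t.2
                    - PySem.List.pyGetD (PySem.List.pyGetD a i []) j 0) := by
        apply Bool.eq_iff_iff.mpr
        simp only [List.all_eq_true]
        constructor
        · intro hall i hi
          rw [PySem.List.mem_pyRange_one] at hi
          have := hall (nb[(i.toNat)]'(by rw [hnbl]; omega)) (List.getElem_mem _)
          rw [← PySem.List.pyGetD_eq_getElem nb 0 hi.1 (by rw [hnbl]; omega),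
              hptw i hi.1 hi.2] at this
          simpa using this
        · intro hall v hv
          obtain ⟨k, hk, rfl⟩ := List.mem_iff_getElem.mp hv
          have hk' : (k : Int) < (b.length : Int) := by
            rw [hnbl] at hk; exact_mod_cast hk
          have := hall (k : Int) (by rw [PySem.List.mem_pyRange_one]; exact ⟨by positivity, hk'⟩)
          rw [← hptw (k : Int) (by positivity) hk',
              PySem.List.pyGetD_eq_getElem nb 0 (by positivity) (by exact_mod_cast hk)] at this
          simpa using this
      by_cases hguard : PySem.List.pyGetD s.1 j 0 = 1
      · rw [hx] at hguard
        simp only [hx, if_pos hguard]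
        exact ⟨hx, hlen, hres⟩
      · have hguard' := hguard
        rw [hx] at hguard'
        simp only [hx, if_neg hguard']
        rw [inner_eq a j s.2 hsa, ← hnb]
        by_cases hall : nb.all (fun v => 0 ≤ v) = true
        · rw [if_pos hall, ← htest, if_pos hall,
              if_pos (show ((nb, true).2 = true) from rfl)]
          refine ⟨rfl, by simpa using hnbl, ?_⟩
          intro i h0 hi
          show PySem.List.pyGetD nb i 0
              = PySem.List.pyGetD b i 0 - pvRowSum (PySem.List.pyGetD a i []) (t.2 ++ [j])
          rw [hptw i h0 hi, pvRowSum_append]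
          ring
        · rw [if_neg hall, ← htest, if_neg hall,
              if_neg (show ¬ ((((nb.takeWhile (fun v => 0 ≤ v)).foldl
                  (fun l v => l ++ [v]) [], false) : List Int × Bool).2 = true) from by simp)]
          exact ⟨hx, hlen, hres⟩
  exact hmain.1
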